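-- pv_equiv track=rewrite | github.com/dodona-edu/feedback-prediction | src/tree_algorithms/treeminer.py | out_scope_test
-- ===== SOURCE A (Python) =====
-- def out_scope_test(x, i, scope_list_x, y, j, scope_list_y):
--     scope_list = []
--     for elem1 in scope_list_x:
--         for elem2 in scope_list_y:
--             if (
--                 elem1 != elem2
--                 and elem1[0] == elem2[0]
--                 and elem1[1] == elem2[1]
--                 and elem1[2][1] < elem2[2][0]
--             ) and (
--                 elem1[0],
--                 elem1[1] + [elem1[2][1]],
--                 elem2[2],
--             ) not in scope_list:
--                 scope_list.append((elem1[0], elem1[1] + [elem1[2][1]], elem2[2]))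
--     return scope_list
-- ===== SOURCE B (Python) =====
-- def out_scope_test(x, i, scope_list_x, y, j, scope_list_y):
--     # Alternative: index scope_list_y by (label, prefix) once; dedup via a membership set.
--     index = {}
--     for e2 in scope_list_y:
--         key = (e2[0], tuple(e2[1]))
--         index[key] = index.get(key, []) + [e2[2]]
--     seen = set()
--     out = []
--     for e1 in scope_list_x:
--         for iv in index.get((e1[0], tuple(e1[1])), []):
--             if iv != e1[2] and e1[2][1] < iv[0]:
--                 k = (e1[0], tuple(e1[1]) + (e1[2][1],), iv)
--                 if k not in seen:
--                     seen.add(k)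
--                     out.append((e1[0], e1[1] + [e1[2][1]], iv))
--     return out
-- ===== Notes on version B (the rewrite author's own statement) =====
-- stated objective: alternative
-- what changed: B builds a (label, prefix)-keyed index of scope_list_y once and deduplicates with a hash set, replacing A's full inner scan of scope_list_y per x-element and its linear 'not in scope_list' rescan of the growing result.
import Mathlib
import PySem

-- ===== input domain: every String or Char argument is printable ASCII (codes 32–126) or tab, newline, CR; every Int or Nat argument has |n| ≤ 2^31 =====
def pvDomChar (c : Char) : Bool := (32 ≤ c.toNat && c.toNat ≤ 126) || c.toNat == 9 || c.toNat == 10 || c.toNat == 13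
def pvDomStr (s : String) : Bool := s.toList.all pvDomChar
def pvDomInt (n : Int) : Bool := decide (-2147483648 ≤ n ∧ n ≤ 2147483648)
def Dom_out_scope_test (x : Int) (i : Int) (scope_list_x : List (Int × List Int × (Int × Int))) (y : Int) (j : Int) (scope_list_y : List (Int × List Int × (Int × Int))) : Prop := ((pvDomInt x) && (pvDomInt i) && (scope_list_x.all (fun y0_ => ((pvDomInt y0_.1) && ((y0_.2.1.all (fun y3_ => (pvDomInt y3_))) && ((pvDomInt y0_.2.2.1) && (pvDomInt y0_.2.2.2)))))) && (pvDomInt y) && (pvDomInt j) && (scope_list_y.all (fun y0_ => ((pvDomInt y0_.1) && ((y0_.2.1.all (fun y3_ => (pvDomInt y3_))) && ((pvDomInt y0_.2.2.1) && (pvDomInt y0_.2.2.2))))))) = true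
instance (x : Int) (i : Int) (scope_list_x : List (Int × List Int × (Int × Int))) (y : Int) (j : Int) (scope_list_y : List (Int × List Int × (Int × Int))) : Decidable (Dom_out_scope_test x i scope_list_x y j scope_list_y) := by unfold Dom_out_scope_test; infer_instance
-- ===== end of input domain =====

-- B replaces A's inner scan of scope_list_y and its linear dedup scan by a (label, prefix)-keyed
-- index built once plus a membership set: an alternative algorithm with the same return value.


-- ===== PORT A =====
def out_scope_test (x : Int) (i : Int) (scope_list_x : List (Int × List Int × (Int × Int))) (y : Int) (j : Int) (scope_list_y : List (Int × List Int × (Int × Int))) : List (Int × List Int × (Int × Int)) :=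
  scope_list_x.foldl (fun scope_list elem1 =>
    scope_list_y.foldl (fun scope_list elem2 =>
      if elem1 ≠ elem2 ∧ elem1.1 = elem2.1 ∧ elem1.2.1 = elem2.2.1 ∧ elem1.2.2.2 < elem2.2.2.1
          ∧ (elem1.1, elem1.2.1 ++ [elem1.2.2.2], elem2.2.2) ∉ scope_list then
        scope_list ++ [(elem1.1, elem1.2.1 ++ [elem1.2.2.2], elem2.2.2)]
      else scope_list) scope_list) []

-- ===== PORT B =====
def out_scope_test_alt (x : Int) (i : Int) (scope_list_x : List (Int × List Int × (Int × Int))) (y : Int) (j : Int) (scope_list_y : List (Int × List Int × (Int × Int))) : List (Int × List Int × (Int × Int)) :=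
  let index : PySem.Dict (Int × List Int) (List (Int × Int)) :=
    scope_list_y.foldl (fun d e2 => d.modify (e2.1, e2.2.1) [] (· ++ [e2.2.2])) PySem.Dict.empty
  (scope_list_x.foldl (fun st e1 =>
      (index.getD (e1.1, e1.2.1) []).foldl (fun st iv =>
        if iv ≠ e1.2.2 ∧ e1.2.2.2 < iv.1 then
          if PySem.Set.contains st.1 (e1.1, e1.2.1 ++ [e1.2.2.2], iv) then st
          else (PySem.Set.add st.1 (e1.1, e1.2.1 ++ [e1.2.2.2], iv),
                st.2 ++ [(e1.1, e1.2.1 ++ [e1.2.2.2], iv)])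
        else st) st)
    ((PySem.Set.empty : PySem.Set (Int × List Int × (Int × Int))), ([] : List (Int × List Int × (Int × Int))))).2

-- ===== PRECONDITION & SPEC =====
def Spec_out_scope_test (x : Int) (i : Int) (scope_list_x : List (Int × List Int × (Int × Int))) (y : Int) (j : Int) (scope_list_y : List (Int × List Int × (Int × Int))) (out : List (Int × List Int × (Int × Int))) : Prop := out = out_scope_test_alt x i scope_list_x y j scope_list_y
instance (x : Int) (i : Int) (scope_list_x : List (Int × List Int × (Int × Int))) (y : Int) (j : Int) (scope_list_y : List (Int × List Int × (Int × Int))) (out : List (Int × List Int × (Int × Int))) : Decidable (Spec_out_scope_test x i scope_list_x y j scope_list_y out) := by unfold Spec_out_scope_test; infer_instance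

-- ===== CLAIM (what is proved, stated in full; the proofs are below) =====
def Claim_equal_out_scope_test : Prop := ∀ (x : Int) (i : Int) (scope_list_x : List (Int × List Int × (Int × Int))) (y : Int) (j : Int) (scope_list_y : List (Int × List Int × (Int × Int))), Dom_out_scope_test x i scope_list_x y j scope_list_y → Spec_out_scope_test x i scope_list_x y j scope_list_y (out_scope_test x i scope_list_x y j scope_list_y)

-- ===== LEMMAS AND PROOFS =====

-- The bucket B's index stores at key k is the projection of the elements of
-- scope_list_y whose (label, prefix) equals k, in order.
lemma pv_bucket_eq (sy : List (Int × List Int × (Int × Int))) (k : Int × List Int) :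
    (sy.foldl (fun d e2 => d.modify (e2.1, e2.2.1) [] (· ++ [e2.2.2]))
      (PySem.Dict.empty : PySem.Dict (Int × List Int) (List (Int × Int)))).getD k []
    = (sy.filter (fun e2 => (e2.1, e2.2.1) == k)).map (fun e2 => e2.2.2) := by
  have h := PySem.Dict.getD_foldl_modify_append
      (l := sy.map (fun e2 => ((e2.1, e2.2.1), e2.2.2)))
      (d := (PySem.Dict.empty : PySem.Dict (Int × List Int) (List (Int × Int)))) (c := k)
  rw [List.foldl_map] at h
  simpa [List.filter_map, Function.comp] using h

-- Adding a fresh element to the seen-set keeps it in sync with the appended output list.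
lemma pv_sync_add (s : PySem.Set (Int × List Int × (Int × Int))) (l : List (Int × List Int × (Int × Int)))
    (x : Int × List Int × (Int × Int)) (h : ∀ t, PySem.Set.contains s t = decide (t ∈ l)) :
    ∀ t, PySem.Set.contains (PySem.Set.add s x) t = decide (t ∈ l ++ [x]) := by
  intro t
  have hts : t ∈ s ↔ t ∈ l := by have := h t; simpa [PySem.Set.contains] using this
  have hxs : x ∈ s ↔ x ∈ l := by have := h x; simpa [PySem.Set.contains] using this
  by_cases hb : PySem.Set.contains s x = true
  · rw [PySem.Set.add, if_pos hb, h t]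
    have hx : x ∈ l := hxs.mp (by simpa [PySem.Set.contains] using hb)
    simp only [List.mem_append, List.mem_singleton, decide_eq_decide]
    constructor
    · exact Or.inl
    · rintro (hl | rfl)
      · exact hl
      · exact hx
  · rw [PySem.Set.add, if_neg hb]
    simp only [PySem.Set.contains] at *
    simp [hts]

-- One x-element: B's fold over its bucket computes A's inner loop over scope_list_y,
-- and the seen-set stays in sync with the output list.
lemma pv_inner_eq (e1 : Int × List Int × (Int × Int)) (sy : List (Int × List Int × (Int × Int)))
    (st : PySem.Set (Int × List Int × (Int × Int)) × List (Int × List Int × (Int × Int)))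
    (hsync : ∀ t, PySem.Set.contains st.1 t = decide (t ∈ st.2)) :
    (let st' := ((sy.filter (fun e2 => (e2.1, e2.2.1) == (e1.1, e1.2.1))).map (fun e2 => e2.2.2)).foldl
        (fun st iv =>
          if iv ≠ e1.2.2 ∧ e1.2.2.2 < iv.1 then
            if PySem.Set.contains st.1 (e1.1, e1.2.1 ++ [e1.2.2.2], iv) then st
            else (PySem.Set.add st.1 (e1.1, e1.2.1 ++ [e1.2.2.2], iv),
                  st.2 ++ [(e1.1, e1.2.1 ++ [e1.2.2.2], iv)])
          else st) st
     st'.2 = sy.foldl (fun scope_list elem2 =>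
        if e1 ≠ elem2 ∧ e1.1 = elem2.1 ∧ e1.2.1 = elem2.2.1 ∧ e1.2.2.2 < elem2.2.2.1
            ∧ (e1.1, e1.2.1 ++ [e1.2.2.2], elem2.2.2) ∉ scope_list then
          scope_list ++ [(e1.1, e1.2.1 ++ [e1.2.2.2], elem2.2.2)]
        else scope_list) st.2
      ∧ ∀ t, PySem.Set.contains st'.1 t = decide (t ∈ st'.2)) := by
  induction sy generalizing st with
  | nil => exact ⟨rfl, hsync⟩
  | cons e2 rest ih =>
    simp only [List.filter_cons, List.foldl_cons]
    by_cases hk : ((e2.1, e2.2.1) == (e1.1, e1.2.1)) = true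
    · obtain ⟨h1, h2⟩ : e2.1 = e1.1 ∧ e2.2.1 = e1.2.1 := by
        simpa [Prod.ext_iff] using hk
      simp only [hk, if_pos, List.map_cons, List.foldl_cons]
      by_cases hc : (e2.2.2 ≠ e1.2.2 ∧ e1.2.2.2 < e2.2.2.1)
      · by_cases hm : PySem.Set.contains st.1 (e1.1, e1.2.1 ++ [e1.2.2.2], e2.2.2) = true
        · have hm' : (e1.1, e1.2.1 ++ [e1.2.2.2], e2.2.2) ∈ st.2 := by
            have := hsync (e1.1, e1.2.1 ++ [e1.2.2.2], e2.2.2); rw [hm] at this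
            exact of_decide_eq_true this.symm
          have hAn : ¬ (e1 ≠ e2 ∧ e1.1 = e2.1 ∧ e1.2.1 = e2.2.1 ∧ e1.2.2.2 < e2.2.2.1
            ∧ (e1.1, e1.2.1 ++ [e1.2.2.2], e2.2.2) ∉ st.2) := fun h => h.2.2.2.2 hm'
          rw [if_pos hc, if_pos hm, if_neg hAn]
          exact ih st hsync
        · have hm' : (e1.1, e1.2.1 ++ [e1.2.2.2], e2.2.2) ∉ st.2 := by
            intro hmem
            exact hm ((hsync _).trans (decide_eq_true hmem))
          have hA : e1 ≠ e2 := by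
            intro he; apply hc.1; rw [he]
          rw [if_pos hc, if_neg hm, if_pos ⟨hA, h1.symm, h2.symm, hc.2, hm'⟩]
          exact ih _ (pv_sync_add st.1 st.2 _ hsync)
      · have hAn : ¬ (e1 ≠ e2 ∧ e1.1 = e2.1 ∧ e1.2.1 = e2.2.1 ∧ e1.2.2.2 < e2.2.2.1
            ∧ (e1.1, e1.2.1 ++ [e1.2.2.2], e2.2.2) ∉ st.2) := by
          intro h
          apply hc
          refine ⟨?_, h.2.2.2.1⟩
          intro he
          exact h.1 (Prod.ext h.2.1 (Prod.ext h.2.2.1 he.symm))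
        rw [if_neg hc, if_neg hAn]
        exact ih st hsync
    · have hAn : ¬ (e1 ≠ e2 ∧ e1.1 = e2.1 ∧ e1.2.1 = e2.2.1 ∧ e1.2.2.2 < e2.2.2.1
          ∧ (e1.1, e1.2.1 ++ [e1.2.2.2], e2.2.2) ∉ st.2) := by
        intro h; apply hk
        simp [h.2.1.symm, h.2.2.1.symm]
      simp only [hk]
      rw [if_neg hAn]
      simpa using ih st hsync

-- The outer loops agree, carrying the seen-set/output-list sync invariant.
lemma pv_outer_eq (sy : List (Int × List Int × (Int × Int))) (sx : List (Int × List Int × (Int × Int)))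
    (st : PySem.Set (Int × List Int × (Int × Int)) × List (Int × List Int × (Int × Int)))
    (hsync : ∀ t, PySem.Set.contains st.1 t = decide (t ∈ st.2)) :
    (let index : PySem.Dict (Int × List Int) (List (Int × Int)) :=
      sy.foldl (fun d e2 => d.modify (e2.1, e2.2.1) [] (· ++ [e2.2.2])) PySem.Dict.empty
     let st' := sx.foldl (fun st e1 =>
        (index.getD (e1.1, e1.2.1) []).foldl (fun st iv =>
          if iv ≠ e1.2.2 ∧ e1.2.2.2 < iv.1 then
            if PySem.Set.contains st.1 (e1.1, e1.2.1 ++ [e1.2.2.2], iv) then st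
            else (PySem.Set.add st.1 (e1.1, e1.2.1 ++ [e1.2.2.2], iv),
                  st.2 ++ [(e1.1, e1.2.1 ++ [e1.2.2.2], iv)])
          else st) st) st
     st'.2 = sx.foldl (fun scope_list elem1 =>
        sy.foldl (fun scope_list elem2 =>
          if elem1 ≠ elem2 ∧ elem1.1 = elem2.1 ∧ elem1.2.1 = elem2.2.1 ∧ elem1.2.2.2 < elem2.2.2.1
              ∧ (elem1.1, elem1.2.1 ++ [elem1.2.2.2], elem2.2.2) ∉ scope_list then
            scope_list ++ [(elem1.1, elem1.2.1 ++ [elem1.2.2.2], elem2.2.2)]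
          else scope_list) scope_list) st.2
      ∧ ∀ t, PySem.Set.contains st'.1 t = decide (t ∈ st'.2)) := by
  induction sx generalizing st with
  | nil => exact ⟨rfl, hsync⟩
  | cons e1 rest ih =>
    simp only [List.foldl_cons, pv_bucket_eq]
    have h := pv_inner_eq e1 sy st hsync
    simp only at h
    obtain ⟨h2, hs⟩ := h
    have := ih _ hs
    simp only [pv_bucket_eq] at this
    rw [← h2]
    exact this

-- ===== VERDICT (by name: the statement is the Claim_ definition above) =====
theorem out_scope_test_spec : Claim_equal_out_scope_test := by
  intro x i sx y j sy _
  unfold Spec_out_scope_test out_scope_test out_scope_test_alt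
  have h := pv_outer_eq sy sx (PySem.Set.empty, []) (by intro t; simp [PySem.Set.empty, PySem.Set.contains])
  simpa using h.1.symm
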